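-- pv_equiv track=rewrite | github.com/Vectorredz/Folder | Prev/meow.py | fury
-- ===== SOURCE A (Python) =====
-- def fury(n):
--     result = []
--     for i in range(len(n)):
--         furies = []
--         for j in range(len(n)):
--             furies.append(abs(n[i]-n[j]))
--         result.append(sorted(furies)[-5])
--     return result
-- ===== SOURCE B (Python) =====
-- def fury(n):
--     result = []
--     for x in n:
--         top = []  # ascending list of (at most) the 5 largest diffs seen so far
--         for y in n:
--             d = abs(x - y)
--             k = 0
--             while k < len(top) and top[k] < d:
--                 k += 1
--             top.insert(k, d)
--             if len(top) > 5:
--                 del top[0]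
--         result.append(top[-5])
--     return result
-- ===== Notes on version B (the rewrite author's own statement) =====
-- stated objective: alternative
-- what changed: Instead of building the full difference list and sorting it per element (O(n log n) each), B keeps a bounded ascending buffer of the 5 largest differences in one pass per element and reads its head as the 5th largest.
import Mathlib
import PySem

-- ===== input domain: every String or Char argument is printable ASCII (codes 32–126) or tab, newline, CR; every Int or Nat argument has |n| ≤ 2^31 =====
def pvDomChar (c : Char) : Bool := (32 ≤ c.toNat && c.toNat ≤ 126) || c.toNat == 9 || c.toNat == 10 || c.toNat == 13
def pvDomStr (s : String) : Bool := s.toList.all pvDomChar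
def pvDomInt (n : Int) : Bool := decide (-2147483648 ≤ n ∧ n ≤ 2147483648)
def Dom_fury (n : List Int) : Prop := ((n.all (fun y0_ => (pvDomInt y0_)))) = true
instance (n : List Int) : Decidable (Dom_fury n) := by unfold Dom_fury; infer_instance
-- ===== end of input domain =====

-- B replaces A's per-element "build all |differences|, sort, take [-5]" by a single pass per
-- element that maintains an ascending buffer of the 5 largest differences (objective: alternative).

-- ===== PORT A =====
def fury (n : List Int) : List Int :=
  (PySem.List.pyRange 0 (n.length : Int) 1).foldl (fun result i =>
    let furies := (PySem.List.pyRange 0 (n.length : Int) 1).foldl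
      (fun furies j => furies ++ [|PySem.List.pyGetD n i 0 - PySem.List.pyGetD n j 0|]) []
    result ++ [PySem.List.pyGetD (PySem.List.sorted furies (fun v => v)) (-5) 0]) []

-- ===== PORT B =====
-- the while loop + list.insert of Source B: insert d before the first element ≥ d
def altInsert (top : List Int) (d : Int) : List Int :=
  match top with
  | [] => [d]
  | t :: ts => if t < d then t :: altInsert ts d else d :: t :: ts

-- one inner-loop body of Source B: insert the new diff, then `del top[0]` if the buffer exceeds 5
def altStep (top : List Int) (d : Int) : List Int :=
  let t := altInsert top d
  if 5 < t.length then t.tail else t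

def fury_alt (n : List Int) : List Int :=
  n.foldl (fun result x =>
    result ++ [PySem.List.pyGetD (n.foldl (fun top y => altStep top |x - y|) []) (-5) 0]) []

-- ===== PRECONDITION & SPEC =====
-- A raises IndexError (sorted(furies)[-5] on a list shorter than 5) when 1 ≤ len(n) ≤ 4;
-- those inputs are excluded.  For n = [] A returns [] normally, so it stays inside.
def Pre_fury (n : List Int) : Prop := n = [] ∨ 5 ≤ n.length
instance (n : List Int) : Decidable (Pre_fury n) := by unfold Pre_fury; infer_instance

def pvWitness_fury : List Int := [1, 2, 3, 4, 5]

def Spec_fury (n : List Int) (out : List Int) : Prop := out = fury_alt n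
instance (n : List Int) (out : List Int) : Decidable (Spec_fury n out) := by unfold Spec_fury; infer_instance

-- ===== CLAIM (what is proved, stated in full; the proofs are below) =====
def Claim_equal_fury : Prop := ∀ (n : List Int), Dom_fury n → Pre_fury n → Spec_fury n (fury n)

-- ===== LEMMAS AND PROOFS =====

-- the last (at most) 5 entries of a list; on a sorted list, its 5 largest entries
def last5 (l : List Int) : List Int := l.drop (l.length - 5)

theorem altInsert_eq (s : List Int) (d : Int) :
    altInsert s d = List.orderedInsert (· ≤ ·) d s := by
  induction s with
  | nil => rfl
  | cons t ts ih =>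
      by_cases h : t < d
      · simp [altInsert, List.orderedInsert, h, ih, not_le.mpr h]
      · simp [altInsert, List.orderedInsert, h, not_lt.mp h]

theorem length_altInsert (s : List Int) (d : Int) :
    (altInsert s d).length = s.length + 1 := by
  rw [altInsert_eq]; exact List.orderedInsert_length (· ≤ ·) s d

theorem pairwise_altInsert {s : List Int} (d : Int) (h : s.Pairwise (· ≤ ·)) :
    (altInsert s d).Pairwise (· ≤ ·) := by
  rw [altInsert_eq]; exact List.Pairwise.orderedInsert d s h

theorem perm_altInsert (s : List Int) (d : Int) : (altInsert s d).Perm (d :: s) := by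
  rw [altInsert_eq]; exact List.perm_orderedInsert _ d s

theorem altInsert_append_forall (u v : List Int) (d : Int) (h : ∀ y ∈ u, y < d) :
    altInsert (u ++ v) d = u ++ altInsert v d := by
  induction u with
  | nil => rfl
  | cons t us ih =>
      simp only [List.cons_append, altInsert, h t (by simp), if_true,
        ih (fun y hy => h y (by simp [hy]))]

theorem altInsert_append_exists (u v : List Int) (d : Int) (h : ∃ y ∈ u, d ≤ y) :
    altInsert (u ++ v) d = altInsert u d ++ v := by
  induction u with
  | nil => rcases h with ⟨y, hy, _⟩; simp at hy
  | cons t us ih =>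
      by_cases ht : t < d
      · have : ∃ y ∈ us, d ≤ y := by
          rcases h with ⟨y, hy, hdy⟩
          rcases List.mem_cons.mp hy with rfl | hy'
          · exact absurd ht (not_lt.mpr hdy)
          · exact ⟨y, hy', hdy⟩
        simp [altInsert, ht, ih this]
      · simp [altInsert, ht]

theorem step_last5 (s : List Int) (d : Int) (hs : s.Pairwise (· ≤ ·)) :
    altStep (last5 s) d = last5 (altInsert s d) := by
  by_cases hle : s.length ≤ 5
  · have h0 : s.length - 5 = 0 := by omega
    by_cases h5 : s.length = 5
    · have h6 : 5 < (altInsert s d).length := by rw [length_altInsert]; omega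
      have h2 : (altInsert s d).length - 5 = 1 := by rw [length_altInsert]; omega
      simp [altStep, last5, h0, h6, h2, List.drop_one]
    · have h6 : ¬ 5 < (altInsert s d).length := by rw [length_altInsert]; omega
      have h2 : (altInsert s d).length - 5 = 0 := by rw [length_altInsert]; omega
      simp [altStep, last5, h0, h6, h2]
  · push_neg at hle
    set u := s.take (s.length - 5) with hu
    set v := s.drop (s.length - 5) with hv
    have hsuv : s = u ++ v := (List.take_append_drop _ s).symm
    have hvlen : v.length = 5 := by rw [hv, List.length_drop]; omega
    have hulen : u.length = s.length - 5 := by rw [hu, List.length_take]; omega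
    have hub : ∀ a ∈ u, ∀ b ∈ v, a ≤ b := by
      have := hsuv ▸ hs
      exact (List.pairwise_append.mp this).2.2
    have hlast : last5 s = v := by rw [last5]
    by_cases hall : ∀ y ∈ u, y < d
    · rw [hlast, hsuv, altInsert_append_forall u v d hall]
      have hw : (altInsert v d).length = 6 := by rw [length_altInsert, hvlen]
      have h6 : 5 < (altInsert v d).length := by omega
      have hdrop : last5 (u ++ altInsert v d) = (altInsert v d).tail := by
        rw [last5, List.length_append, hw, show u.length + 6 - 5 = u.length + 1 by omega,
          List.drop_append, List.drop_of_length_le (by omega),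
          show u.length + 1 - u.length = 1 by omega, List.drop_one, List.nil_append]
      rw [hdrop]
      simp [altStep, h6]
    · push_neg at hall
      rcases hall with ⟨y, hyu, hdy⟩
      rw [hlast, hsuv, altInsert_append_exists u v d ⟨y, hyu, hdy⟩]
      have hdv : ∀ b ∈ v, d ≤ b := fun b hb => le_trans hdy (hub y hyu b hb)
      have hvshape : altInsert v d = d :: v := by
        cases hvv : v with
        | nil => rw [hvv] at hvlen; simp at hvlen
        | cons b vs =>
            have : ¬ b < d := not_lt.mpr (hdv b (by rw [hvv]; simp))
            simp [altInsert, this]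
      have hstep : altStep v d = v := by
        simp [altStep, hvshape, hvlen]
      rw [hstep, last5, List.length_append, length_altInsert, hvlen,
        show u.length + 1 + 5 - 5 = u.length + 1 by omega,
        List.drop_append, List.drop_of_length_le (le_of_eq (length_altInsert u d)),
        show u.length + 1 - (altInsert u d).length = 0 by rw [length_altInsert]; omega,
        List.drop_zero, List.nil_append]

theorem foldl_altStep (xs : List Int) :
    ∀ s : List Int, s.Pairwise (· ≤ ·) →
      xs.foldl altStep (last5 s) = last5 (xs.foldl altInsert s) := by
  induction xs with
  | nil => intro s _; rfl
  | cons x xs ih =>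
      intro s hs
      simp only [List.foldl_cons]
      rw [step_last5 s x hs]
      exact ih (altInsert s x) (pairwise_altInsert x hs)

theorem foldl_altInsert_perm (xs : List Int) :
    ∀ s : List Int, (xs.foldl altInsert s).Perm (xs ++ s) := by
  induction xs with
  | nil => intro s; simp
  | cons x xs ih =>
      intro s
      simp only [List.foldl_cons, List.cons_append]
      exact ((ih (altInsert s x)).trans
        ((List.Perm.append_left xs (perm_altInsert s x)).trans List.perm_middle))

theorem foldl_altInsert_pairwise (xs : List Int) :
    ∀ s : List Int, s.Pairwise (· ≤ ·) → (xs.foldl altInsert s).Pairwise (· ≤ ·) := by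
  induction xs with
  | nil => intro s hs; exact hs
  | cons x xs ih => intro s hs; exact ih _ (pairwise_altInsert x hs)

theorem pyGetD_neg5_of_len5 (l : List Int) (h : l.length = 5) :
    PySem.List.pyGetD l (-5) 0 = l.headD 0 := by
  rw [PySem.List.pyGetD_neg_ofNat l 5 0 (by omega) (le_of_eq h.symm)]
  have h0 : l.length - 5 = 0 := by omega
  simp only [h0]
  cases l with
  | nil => simp at h
  | cons a t => rfl

theorem core (xs : List Int) (h5 : 5 ≤ xs.length) :
    PySem.List.pyGetD (PySem.List.sorted xs (fun v => v)) (-5) 0 =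
      PySem.List.pyGetD (xs.foldl altStep []) (-5) 0 := by
  have hperm : (xs.foldl altInsert []).Perm xs := by
    simpa using foldl_altInsert_perm xs []
  have hpw : (xs.foldl altInsert []).Pairwise (· ≤ ·) :=
    foldl_altInsert_pairwise xs [] List.Pairwise.nil
  have hsorted : PySem.List.sorted xs (fun v => v) = xs.foldl altInsert [] :=
    PySem.List.sorted_id_eq_of_perm_of_pairwise xs _ hperm hpw
  have hlen : (xs.foldl altInsert []).length = xs.length := hperm.length_eq
  have hfold : xs.foldl altStep [] = last5 (xs.foldl altInsert []) := by
    simpa [last5] using foldl_altStep xs [] List.Pairwise.nil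
  have hflen : (xs.foldl altStep []).length = 5 := by
    rw [hfold, last5, List.length_drop, hlen]; omega
  rw [pyGetD_neg5_of_len5 _ hflen]
  rw [hsorted, hfold, PySem.List.pyGetD_neg_ofNat _ 5 0 (by omega) (by omega),
    last5, List.headD_eq_head?_getD, List.head?_drop,
    List.getElem?_eq_getElem (by omega), Option.getD_some]

theorem inner_eq_map (n : List Int) (xi : Int) :
    (PySem.List.pyRange 0 (n.length : Int) 1).foldl
      (fun furies j => furies ++ [|xi - PySem.List.pyGetD n j 0|]) [] =
      n.map (fun y => |xi - y|) := by
  rw [PySem.List.foldl_append_singleton_eq_map, List.nil_append,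
    show (fun j => |xi - PySem.List.pyGetD n j 0|) =
      (fun y => |xi - y|) ∘ (fun j => PySem.List.pyGetD n j 0) from rfl,
    ← List.map_map, PySem.List.map_pyGetD_pyRange_zero']

theorem fury_eq_map (n : List Int) :
    fury n = n.map (fun x =>
      PySem.List.pyGetD
        (PySem.List.sorted (n.map fun y => |x - y|) (fun v => v)) (-5) 0) := by
  have h1 : fury n = (PySem.List.pyRange 0 (n.length : Int) 1).foldl
      (fun result i => result ++
        [PySem.List.pyGetD
          (PySem.List.sorted
            ((PySem.List.pyRange 0 (n.length : Int) 1).foldl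
              (fun furies j =>
                furies ++ [|PySem.List.pyGetD n i 0 - PySem.List.pyGetD n j 0|]) [])
            (fun v => v)) (-5) 0]) [] := rfl
  rw [h1, PySem.List.foldl_append_singleton_eq_map, List.nil_append,
    show (fun i => PySem.List.pyGetD
        (PySem.List.sorted
          ((PySem.List.pyRange 0 (n.length : Int) 1).foldl
            (fun furies j =>
              furies ++ [|PySem.List.pyGetD n i 0 - PySem.List.pyGetD n j 0|]) [])
          (fun v => v)) (-5) 0) =
      (fun x => PySem.List.pyGetD
        (PySem.List.sorted
          ((PySem.List.pyRange 0 (n.length : Int) 1).foldl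
            (fun furies j => furies ++ [|x - PySem.List.pyGetD n j 0|]) [])
          (fun v => v)) (-5) 0) ∘ (fun i => PySem.List.pyGetD n i 0) from rfl,
    ← List.map_map, PySem.List.map_pyGetD_pyRange_zero']
  exact List.map_congr_left fun x _ => by rw [inner_eq_map n x]

theorem fury_alt_eq_map (n : List Int) :
    fury_alt n = n.map (fun x =>
      PySem.List.pyGetD ((n.map fun y => |x - y|).foldl altStep []) (-5) 0) := by
  have h1 : fury_alt n = n.foldl (fun result x =>
      result ++ [PySem.List.pyGetD (n.foldl (fun top y => altStep top |x - y|) []) (-5) 0]) [] := rfl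
  rw [h1, PySem.List.foldl_append_singleton_eq_map, List.nil_append]
  exact List.map_congr_left fun x _ => by rw [List.foldl_map]

-- ===== VERDICT (by name: the statement is the Claim_ definition above) =====
theorem fury_spec : Claim_equal_fury := by
  intro n _ hpre
  unfold Spec_fury
  rw [fury_eq_map, fury_alt_eq_map]
  rcases hpre with h | h
  · subst h; rfl
  · refine List.map_congr_left (fun x _ => ?_)
    exact core (n.map fun y => |x - y|) (by simpa using h)
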